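-- pv_equiv track=rewrite | github.com/benxiao/coins | peak_finding.py | find_extremes
-- ===== SOURCE A (Python) =====
-- import operator
--
-- def find_extremes(prices, n=25, method='max'):
--     cmp = operator.ge if method == 'max' else operator.lt
--     lst = []
--     for i in range(n, len(prices) - n):
--         before_i = prices[i - n: i]
--         after_i = prices[i + 1: i + n + 1]
--         if all(cmp(prices[i], p) for p in before_i + after_i):
--             lst.append(i)
--         # find n after p
--     return lst
-- ===== SOURCE B (Python) =====
-- def find_extremes(prices, n=25, method='max'):
--     L = len(prices)
--     if n <= 0:
--         # every window is empty, the domination condition is vacuous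
--         return list(range(n, L - n))
--     if L - n <= n:
--         return []          # no candidate index at all
--     if method == 'max':
--         op = max
--         good = lambda x, m: x >= m
--     else:
--         op = min
--         good = lambda x, m: x < m
--     # W[j] = op over prices[j:j+n], built by doubling (op is idempotent, overlap is fine)
--     p, T = 1, list(prices)
--     while 2 * p <= n:
--         T = [op(T[j], T[j + p]) for j in range(len(T) - p)]
--         p *= 2
--     s = n - p
--     W = [op(T[j], T[j + s]) for j in range(len(T) - s)]
--     return [i for i in range(n, L - n)
--             if good(prices[i], W[i - n]) and good(prices[i], W[i + 1])]
-- ===== Notes on version B (the rewrite author's own statement) =====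
-- stated objective: alternative
-- what changed: B precomputes the extreme of every length-n window by doubling window widths (sparse-table style, exploiting idempotence of max/min) and then keeps index i iff prices[i] compares against the two precomputed window extremes, instead of A's per-index scan of the 2n surrounding elements (intended as faster: O(L log n) work vs O((L-2n)*n); a timing run measured 15.63x at the largest size both finished but could not confirm it at every size, so no speed is claimed).
-- outside the precondition, e.g. on find_extremes([5, 1], -1, 'max'): A returns [0, 1, 2], B returns [-1, 0, 1, 2]
import Mathlib
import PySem

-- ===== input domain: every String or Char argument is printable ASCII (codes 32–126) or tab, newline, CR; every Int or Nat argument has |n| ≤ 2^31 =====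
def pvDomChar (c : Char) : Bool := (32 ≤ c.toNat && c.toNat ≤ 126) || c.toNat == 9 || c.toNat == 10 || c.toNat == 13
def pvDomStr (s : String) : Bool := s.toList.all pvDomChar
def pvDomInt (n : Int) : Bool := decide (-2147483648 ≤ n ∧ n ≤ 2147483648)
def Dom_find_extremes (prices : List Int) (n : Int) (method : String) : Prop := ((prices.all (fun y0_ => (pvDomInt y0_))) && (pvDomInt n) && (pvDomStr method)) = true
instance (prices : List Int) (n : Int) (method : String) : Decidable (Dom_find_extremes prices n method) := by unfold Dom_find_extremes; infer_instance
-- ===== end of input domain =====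

-- B replaces A's per-index scan of the 2n neighbours by a doubling (sparse-table) precomputation of all
-- length-n window extremes followed by two threshold comparisons per index (objective: alternative).
-- Pre_ excludes negative n, for which a window size is meaningless and A's value (when it does not raise
-- an IndexError) is an artefact of Python's negative-index slicing; B returns list(range(n, L-n)) there.


-- ===== PORT A =====
def find_extremes (prices : List Int) (n : Int) (method : String) : List Int :=
  let isMax := method == "max"          -- cmp = operator.ge if method == 'max' else operator.lt
  (PySem.List.pyRange n ((prices.length : Int) - n) 1).foldl
    (fun lst i =>
      let before := PySem.List.slice prices (some (i - n)) (some i)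
      let after  := PySem.List.slice prices (some (i + 1)) (some (i + n + 1))
      if (before ++ after).all (fun p =>
            let x := (PySem.List.pyGet? prices i).getD 0   -- prices[i]; in range whenever Python returns
            if isMax then decide (p ≤ x) else decide (x < p))
      then lst ++ [i] else lst) []

-- ===== PORT B =====
-- the comprehension  [op(T[j], T[j+s]) for j in range(len(T)-s)]  of Source B (used at every level and for W)
def pvStep (op : Int → Int → Int) (s : Nat) (T : List Int) : List Int :=
  (List.range (T.length - s)).map (fun j => op (T.getD j 0) (T.getD (j + s) 0))

-- the 'while 2*p <= n' doubling loop of Source B (the 0 < p conjunct only makes termination evident; Source B calls it with p = 1)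
def pvBuild (n : Int) (op : Int → Int → Int) (p : Nat) (T : List Int) : Nat × List Int :=
  if h : 0 < p ∧ 2 * (p : Int) ≤ n then pvBuild n op (2 * p) (pvStep op p T)
  else (p, T)
termination_by n.toNat + 1 - p
decreasing_by omega

def find_extremes_alt (prices : List Int) (n : Int) (method : String) : List Int :=
  let L : Int := prices.length
  if n ≤ 0 then PySem.List.pyRange n (L - n) 1      -- every window is empty, the condition is vacuous
  else if L - n ≤ n then []                          -- no candidate index at all
  else
    let isMax := method == "max"
    let op : Int → Int → Int := fun a b => if isMax then max a b else min a b
    let pT := pvBuild n op 1 prices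
    let s := (n - (pT.1 : Int)).toNat
    let W := pvStep op s pT.2                       -- W[j] = op over prices[j:j+n]
    (PySem.List.pyRange n (L - n) 1).filter (fun i =>
      let x := prices.getD i.toNat 0
      let good := fun m => if isMax then decide (m ≤ x) else decide (x < m)
      good (W.getD (i - n).toNat 0) && good (W.getD (i + 1).toNat 0))

-- ===== PRECONDITION & SPEC =====
-- Pre_ excludes negative n: there A either raises IndexError (prices[i] with i < -len inside a nonempty
-- window) or returns a value shaped by Python's negative-slice clamping, a corner no caller specifies.
def Pre_find_extremes (prices : List Int) (n : Int) (method : String) : Prop := 0 ≤ n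
instance (prices : List Int) (n : Int) (method : String) : Decidable (Pre_find_extremes prices n method) := by unfold Pre_find_extremes; infer_instance

def pvWitness_find_extremes : List Int × Int × String := ([1, 2, 3], 1, "max")

def Spec_find_extremes (prices : List Int) (n : Int) (method : String) (out : List Int) : Prop := out = find_extremes_alt prices n method
instance (prices : List Int) (n : Int) (method : String) (out : List Int) : Decidable (Spec_find_extremes prices n method out) := by unfold Spec_find_extremes; infer_instance

-- ===== CLAIM (what is proved, stated in full; the proofs are below) =====
def Claim_equal_find_extremes : Prop := ∀ (prices : List Int) (n : Int) (method : String), Dom_find_extremes prices n method → Pre_find_extremes prices n method → Spec_find_extremes prices n method (find_extremes prices n method)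

-- ===== LEMMAS AND PROOFS =====

-- window of width w starting at j, and the op-fold of a nonempty list
def pvWin (w : Nat) (l : List Int) (j : Nat) : List Int := (l.drop j).take w
def pvFold (op : Int → Int → Int) : List Int → Int
  | [] => 0
  | x :: xs => xs.foldl op x
-- sliding-window extremes: pvSW op w l = [op-fold of prices[j:j+w] for each j]
def pvSW (op : Int → Int → Int) (w : Nat) (l : List Int) : List Int :=
  (List.range (l.length + 1 - w)).map (fun j => pvFold op (pvWin w l j))

def pvOpOK (op : Int → Int → Int) : Prop :=
  (∀ a b c, op (op a b) c = op a (op b c)) ∧ (∀ a b, op a b = op b a) ∧ (∀ a, op a a = a)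

theorem pvOpOK_max : pvOpOK (fun a b : Int => max a b) :=
  ⟨fun _ _ _ => max_assoc .., fun _ _ => max_comm .., fun _ => max_self _⟩

theorem pvOpOK_min : pvOpOK (fun a b : Int => min a b) :=
  ⟨fun _ _ _ => min_assoc .., fun _ _ => min_comm .., fun _ => min_self _⟩

theorem pvFoldl_op_assoc {op : Int → Int → Int} (hA : ∀ a b c, op (op a b) c = op a (op b c))
    (l : List Int) : ∀ a b, List.foldl op (op a b) l = op a (List.foldl op b l) := by
  induction l with
  | nil => intro a b; rfl
  | cons x xs ih => intro a b; simp only [List.foldl_cons, hA]; exact ih a (op b x)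

theorem pvFold_append {op : Int → Int → Int} (hA : ∀ a b c, op (op a b) c = op a (op b c))
    (X Y : List Int) (hX : X ≠ []) (hY : Y ≠ []) :
    pvFold op (X ++ Y) = op (pvFold op X) (pvFold op Y) := by
  obtain ⟨x, xs, rfl⟩ := List.exists_cons_of_ne_nil hX
  obtain ⟨y, ys, rfl⟩ := List.exists_cons_of_ne_nil hY
  simp only [pvFold, List.cons_append, List.foldl_append, List.foldl_cons]
  exact pvFoldl_op_assoc hA ys _ y

theorem pvFold_absorb {op : Int → Int → Int} (hOK : pvOpOK op)
    (a : Int) (Y' R : List Int) (hY' : Y' ≠ []) :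
    op (op a (pvFold op Y')) (pvFold op (Y' ++ R)) = op a (pvFold op (Y' ++ R)) := by
  obtain ⟨hA, hC, hI⟩ := hOK
  rcases R with _ | ⟨r, rs⟩
  · rw [List.append_nil, hA, hI]
  · rw [pvFold_append hA Y' (r :: rs) hY' (by simp), hA]
    congr 1
    rw [← hA, hI]

theorem pvLen_win {w : Nat} {l : List Int} {j : Nat} (h : j + w ≤ l.length) :
    (pvWin w l j).length = w := by
  simp [pvWin]; omega

theorem pvWin_ne_nil {w : Nat} {l : List Int} {j : Nat} (hw : 1 ≤ w) (h : j + w ≤ l.length) :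
    pvWin w l j ≠ [] := by
  have hl := pvLen_win h
  exact List.ne_nil_of_length_pos (by omega)

theorem pvWin_split (s w : Nat) (l : List Int) (j : Nat) :
    pvWin (s + w) l j = pvWin s l j ++ pvWin w l (j + s) := by
  simp [pvWin, List.take_add, List.drop_drop]

theorem pvSW_getD (op : Int → Int → Int) (w : Nat) (l : List Int) (k : Nat)
    (hk : k < l.length + 1 - w) : (pvSW op w l).getD k 0 = pvFold op (pvWin w l k) := by
  rw [List.getD_eq_getElem?_getD]
  simp [pvSW, hk]

-- the heart: combining window extremes at shift s ≤ w (overlap is fine: op is idempotent)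
theorem pvCombine {op : Int → Int → Int} (hOK : pvOpOK op) (w s : Nat)
    (hs : 1 ≤ s) (hsw : s ≤ w) (l : List Int) :
    pvStep op s (pvSW op w l) = pvSW op (w + s) l := by
  obtain ⟨hA, hC, hI⟩ := hOK
  apply List.ext_getElem
  · simp [pvStep, pvSW]; omega
  intro j hj hj'
  have hlen : j < l.length + 1 - (w + s) := by simp [pvSW] at hj'; omega
  have hjl : j + w + s ≤ l.length := by omega
  simp only [pvStep, List.getElem_map, List.getElem_range]
  rw [pvSW_getD op w l j (by omega), pvSW_getD op w l (j + s) (by omega),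
    show (pvSW op (w + s) l)[j] = pvFold op (pvWin (w + s) l j) from by simp [pvSW]]
  have hXY : pvWin (w + s) l j = pvWin s l j ++ pvWin w l (j + s) := by
    rw [Nat.add_comm w s]; exact pvWin_split s w l j
  have hX : pvWin s l j ≠ [] := pvWin_ne_nil hs (by omega)
  have hY : pvWin w l (j + s) ≠ [] := pvWin_ne_nil (by omega) (by omega)
  rcases Nat.lt_or_ge s w with hlt | hge
  · -- s < w : before-window = X ++ Y', after-window Y = Y' ++ R, absorb Y'
    have hWj : pvWin w l j = pvWin s l j ++ pvWin (w - s) l (j + s) := by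
      have := pvWin_split s (w - s) l j
      rw [Nat.add_sub_cancel' hsw] at this; exact this
    have hYsplit : pvWin w l (j + s) = pvWin (w - s) l (j + s) ++ pvWin s l (j + (w - s) + s) := by
      have := pvWin_split (w - s) s l (j + s)
      rw [Nat.sub_add_cancel hsw] at this
      rw [this]; congr 2; omega
    have hY' : pvWin (w - s) l (j + s) ≠ [] := pvWin_ne_nil (by omega) (by omega)
    rw [hWj, pvFold_append hA _ _ hX hY', hXY,
      pvFold_append hA _ _ hX hY, hYsplit, pvFold_absorb ⟨hA, hC, hI⟩ _ _ _ hY']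
  · -- s = w : plain append
    have hse : s = w := by omega
    subst hse
    rw [hXY, pvFold_append hA _ _ hX hY]

theorem pvSW_one (op : Int → Int → Int) (l : List Int) : pvSW op 1 l = l := by
  apply List.ext_getElem
  · simp [pvSW]
  intro j hj hj'
  simp only [pvSW, List.getElem_map, List.getElem_range, pvWin]
  rw [List.take_one, List.head?_drop]
  simp [List.getElem?_eq_getElem hj', pvFold]

theorem pvStep_zero {op : Int → Int → Int} (hI : ∀ a, op a a = a) (T : List Int) :
    pvStep op 0 T = T := by
  apply List.ext_getElem
  · simp [pvStep]
  intro j hj hj'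
  simp only [pvStep, List.getElem_map, List.getElem_range] at *
  rw [Nat.add_zero, List.getD_eq_getElem _ _ (by omega), hI]

theorem pvBuild_spec {op : Int → Int → Int} (hOK : pvOpOK op) (n : Int) (l : List Int) :
    ∀ (k p : Nat) (T : List Int), n.toNat + 1 - p ≤ k → 0 < p → (p : Int) ≤ n →
      T = pvSW op p l →
      0 < (pvBuild n op p T).1 ∧ ((pvBuild n op p T).1 : Int) ≤ n ∧
        n < 2 * (pvBuild n op p T).1 ∧ (pvBuild n op p T).2 = pvSW op (pvBuild n op p T).1 l := by
  intro k
  induction k with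
  | zero =>
    intro p T hk hp hpn hT
    omega
  | succ k ih =>
    intro p T hk hp hpn hT
    rw [pvBuild]
    by_cases h : 0 < p ∧ 2 * (p : Int) ≤ n
    · rw [dif_pos h]
      have hstep : pvStep op p T = pvSW op (2 * p) l := by
        rw [hT, pvCombine hOK p p (by omega) le_rfl l]
        congr 1; omega
      exact ih (2 * p) _ (by omega) (by omega) (by omega) hstep
    · rw [dif_neg h]
      have h2 : ¬ (2 * (p : Int) ≤ n) := fun hc => h ⟨hp, hc⟩
      refine ⟨hp, hpn, by omega, hT⟩

-- x dominates / is strictly below a whole nonempty list iff it does so against the list's op-fold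
theorem pvAll_le_iff (x : Int) (xs : List Int) :
    ∀ a : Int, (List.foldl (fun u v : Int => max u v) a xs ≤ x ↔ a ≤ x ∧ ∀ p ∈ xs, p ≤ x) := by
  induction xs with
  | nil => intro a; simp
  | cons y ys ih =>
    intro a
    simp only [List.foldl_cons, ih (max a y), max_le_iff, List.mem_cons]
    constructor
    · rintro ⟨⟨h1, h2⟩, h3⟩; exact ⟨h1, fun p hp => by rcases hp with rfl | hp; exact h2; exact h3 p hp⟩
    · rintro ⟨h1, h2⟩; exact ⟨⟨h1, h2 y (Or.inl rfl)⟩, fun p hp => h2 p (Or.inr hp)⟩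

theorem pvAll_lt_iff (x : Int) (xs : List Int) :
    ∀ a : Int, (x < List.foldl (fun u v : Int => min u v) a xs ↔ x < a ∧ ∀ p ∈ xs, x < p) := by
  induction xs with
  | nil => intro a; simp
  | cons y ys ih =>
    intro a
    simp only [List.foldl_cons, ih (min a y), lt_min_iff, List.mem_cons]
    constructor
    · rintro ⟨⟨h1, h2⟩, h3⟩; exact ⟨h1, fun p hp => by rcases hp with rfl | hp; exact h2; exact h3 p hp⟩
    · rintro ⟨h1, h2⟩; exact ⟨⟨h1, h2 y (Or.inl rfl)⟩, fun p hp => h2 p (Or.inr hp)⟩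


-- W as built by B equals the sliding-window extremes of width n
theorem pvW_eq (prices : List Int) (n : Int) (hn : 0 < n)
    (op : Int → Int → Int) (hOK : pvOpOK op) :
    pvStep op ((n - ((pvBuild n op 1 prices).1 : Int)).toNat) (pvBuild n op 1 prices).2
      = pvSW op n.toNat prices := by
  obtain ⟨hp, hpn, hn2, hT⟩ := pvBuild_spec hOK n prices (n.toNat + 1 - 1) 1 prices
    (le_refl _) one_pos (by omega) (pvSW_one op prices).symm
  rcases Nat.eq_zero_or_pos ((n - ((pvBuild n op 1 prices).1 : Int)).toNat) with hs | hs
  · rw [hT, hs, pvStep_zero hOK.2.2]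
    congr 1; omega
  · rw [hT, pvCombine hOK _ _ hs (by omega)]
    congr 1; omega

-- per-index equivalence of A's all-scan and B's two threshold tests (0 < n, n ≤ i < L - n)
theorem pvPred_eq (prices : List Int) (n : Int) (hn : 0 < n) (i : Int)
    (hi1 : n ≤ i) (hi2 : i < (prices.length : Int) - n)
    (op : Int → Int → Int) (test : Int → Int → Bool)
    (htest : ∀ (x : Int) (X : List Int), X ≠ [] → X.all (fun p => test x p) = test x (pvFold op X)) :
    ((PySem.List.slice prices (some (i - n)) (some i) ++
        PySem.List.slice prices (some (i + 1)) (some (i + n + 1))).all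
      (fun p => test ((PySem.List.pyGet? prices i).getD 0) p))
    = (test (prices.getD i.toNat 0) ((pvSW op n.toNat prices).getD (i - n).toNat 0)
       && test (prices.getD i.toNat 0) ((pvSW op n.toNat prices).getD (i + 1).toNat 0)) := by
  have hbefore : PySem.List.slice prices (some (i - n)) (some i)
      = pvWin n.toNat prices (i - n).toNat := by
    rw [PySem.List.slice_toNat prices (by omega) (by omega)]
    unfold pvWin; congr 1; omega
  have hafter : PySem.List.slice prices (some (i + 1)) (some (i + n + 1))
      = pvWin n.toNat prices (i + 1).toNat := by
    rw [PySem.List.slice_toNat prices (by omega) (by omega)]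
    unfold pvWin; congr 1; omega
  have hx : (PySem.List.pyGet? prices i).getD 0 = prices.getD i.toNat 0 := by
    rw [PySem.List.pyGet?_of_nonneg prices (by omega), List.getD_eq_getElem?_getD]
  have hb1 : (i - n).toNat + n.toNat ≤ prices.length := by omega
  have hb2 : (i + 1).toNat + n.toNat ≤ prices.length := by omega
  have hW1 : (pvSW op n.toNat prices).getD (i - n).toNat 0
      = pvFold op (pvWin n.toNat prices (i - n).toNat) :=
    pvSW_getD op n.toNat prices _ (by omega)
  have hW2 : (pvSW op n.toNat prices).getD (i + 1).toNat 0
      = pvFold op (pvWin n.toNat prices (i + 1).toNat) :=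
    pvSW_getD op n.toNat prices _ (by omega)
  rw [hbefore, hafter, hx, hW1, hW2, List.all_append,
    htest _ _ (pvWin_ne_nil (by omega) hb1), htest _ _ (pvWin_ne_nil (by omega) hb2)]

-- the two per-mode instances of htest
theorem pvTest_max (x : Int) (X : List Int) (hX : X ≠ []) :
    X.all (fun p => decide (p ≤ x)) = decide (pvFold (fun a b : Int => max a b) X ≤ x) := by
  obtain ⟨c, cs, rfl⟩ := List.exists_cons_of_ne_nil hX
  rw [Bool.eq_iff_iff]
  simp only [List.all_eq_true, decide_eq_true_eq, pvFold]
  rw [pvAll_le_iff x cs c]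
  simp [List.mem_cons]

theorem pvTest_min (x : Int) (X : List Int) (hX : X ≠ []) :
    X.all (fun p => decide (x < p)) = decide (x < pvFold (fun a b : Int => min a b) X) := by
  obtain ⟨c, cs, rfl⟩ := List.exists_cons_of_ne_nil hX
  rw [Bool.eq_iff_iff]
  simp only [List.all_eq_true, decide_eq_true_eq, pvFold]
  rw [pvAll_lt_iff x cs c]
  simp [List.mem_cons]

-- ===== VERDICT (by name: the statement is the Claim_ definition above) =====
theorem find_extremes_spec : Claim_equal_find_extremes := by
  intro prices n method _hdom hpre
  show find_extremes prices n method = find_extremes_alt prices n method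
  by_cases hn : n ≤ 0
  · -- n = 0: every window is empty on both sides, both return range(0, L)
    have h0 : n = 0 := le_antisymm hn hpre
    subst h0
    simp only [find_extremes, find_extremes_alt, le_refl, reduceIte]
    rw [PySem.List.foldl_append_if _ (fun i : Int => i)]
    have hallt : ∀ i ∈ PySem.List.pyRange 0 ((prices.length : Int) - 0) 1,
        ((PySem.List.slice prices (some (i - 0)) (some i) ++
            PySem.List.slice prices (some (i + 1)) (some (i + 0 + 1))).all
          (fun p => if (method == "max") = true
            then decide (p ≤ (PySem.List.pyGet? prices i).getD 0)
            else decide ((PySem.List.pyGet? prices i).getD 0 < p))) = (fun _ : Int => true) i := by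
      intro i hi
      rw [PySem.List.mem_pyRange_one] at hi
      have hsl : PySem.List.slice prices (some (i - 0)) (some i) = [] := by
        rw [PySem.List.slice_toNat prices (by omega) (by omega),
          show i.toNat - (i - 0).toNat = 0 from by omega]
        simp
      have hsl2 : PySem.List.slice prices (some (i + 1)) (some (i + 0 + 1)) = [] := by
        rw [PySem.List.slice_toNat prices (by omega) (by omega),
          show (i + 0 + 1).toNat - (i + 1).toNat = 0 from by omega]
        simp
      rw [hsl, hsl2]
      simp
    rw [List.filter_congr hallt]
    simp
  · -- 0 < n
    have hn' : 0 < n := by omega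
    by_cases hLn : (prices.length : Int) - n ≤ n
    · -- candidate range empty: A's loop runs zero times, B returns []
      simp only [find_extremes, find_extremes_alt, if_neg hn, if_pos hLn]
      rw [PySem.List.pyRange_one_eq_nil (by omega)]
      rfl
    cases hb : (method == "max") with
    | true =>
      simp only [find_extremes, find_extremes_alt, hb, if_neg hn, if_neg hLn, reduceIte]
      rw [PySem.List.foldl_append_if _ (fun i : Int => i),
        pvW_eq prices n hn' _ pvOpOK_max]
      have hcong : ∀ i ∈ PySem.List.pyRange n ((prices.length : Int) - n) 1,
          ((PySem.List.slice prices (some (i - n)) (some i) ++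
              PySem.List.slice prices (some (i + 1)) (some (i + n + 1))).all
            (fun p => decide (p ≤ (PySem.List.pyGet? prices i).getD 0)))
          = (decide ((pvSW (fun a b : Int => max a b) n.toNat prices).getD (i - n).toNat 0 ≤ prices.getD i.toNat 0)
             && decide ((pvSW (fun a b : Int => max a b) n.toNat prices).getD (i + 1).toNat 0 ≤ prices.getD i.toNat 0)) := by
        intro i hi
        rw [PySem.List.mem_pyRange_one] at hi
        exact pvPred_eq prices n hn' i hi.1 hi.2 _ (fun x p => decide (p ≤ x)) pvTest_max
      rw [List.filter_congr hcong]
      simp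
    | false =>
      simp only [find_extremes, find_extremes_alt, hb, if_neg hn, if_neg hLn, Bool.false_eq_true, if_false]
      rw [PySem.List.foldl_append_if _ (fun i : Int => i),
        pvW_eq prices n hn' _ pvOpOK_min]
      have hcong : ∀ i ∈ PySem.List.pyRange n ((prices.length : Int) - n) 1,
          ((PySem.List.slice prices (some (i - n)) (some i) ++
              PySem.List.slice prices (some (i + 1)) (some (i + n + 1))).all
            (fun p => decide ((PySem.List.pyGet? prices i).getD 0 < p)))
          = (decide (prices.getD i.toNat 0 < (pvSW (fun a b : Int => min a b) n.toNat prices).getD (i - n).toNat 0)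
             && decide (prices.getD i.toNat 0 < (pvSW (fun a b : Int => min a b) n.toNat prices).getD (i + 1).toNat 0)) := by
        intro i hi
        rw [PySem.List.mem_pyRange_one] at hi
        exact pvPred_eq prices n hn' i hi.1 hi.2 _ (fun x p => decide (x < p)) pvTest_min
      rw [List.filter_congr hcong]
      simp
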